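-- pv_equiv track=rewrite | github.com/yasufumi-nakata/Pytra | src/toolchain2/compile/passes.py | _parse_tuple_element_types
-- ===== SOURCE A (Python) =====
-- def _parse_tuple_element_types(rt: str) -> list[str]:
--     """Parse "tuple[int64,str,float64]" into ["int64", "str", "float64"]."""
--     if not rt.startswith("tuple[") or not rt.endswith("]"):
--         return []
--     inner = rt[6:-1]
--     parts: list[str] = []
--     depth = 0
--     cur: list[str] = []
--     for ch in inner:
--         if ch == "[":
--             depth += 1
--             cur.append(ch)
--         elif ch == "]":
--             depth -= 1
--             cur.append(ch)
--         elif ch == "," and depth == 0: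
--             parts.append("".join(cur).strip())
--             cur = []
--         else:
--             cur.append(ch)
--     tail = "".join(cur).strip()
--     if tail != "":
--         parts.append(tail)
--     return parts
-- ===== SOURCE B (Python) =====
-- def _parse_tuple_element_types(rt: str) -> list[str]:
--     """Parse "tuple[int64,str,float64]" into ["int64", "str", "float64"]."""
--     if not (rt.startswith("tuple[") and rt.endswith("]")):
--         return []
--     inner = rt[6:-1]
--     # pass 1: cut positions (start of each segment; a cut sits right after each
--     # top-level comma; sentinel len(inner)+1 so every slice below is [a : b-1])
--     depth = 0
--     cuts = [0]
--     for i, ch in enumerate(inner):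
--         if ch == "[":
--             depth += 1
--         elif ch == "]":
--             depth -= 1
--         elif ch == "," and depth == 0:
--             cuts.append(i + 1)
--     cuts.append(len(inner) + 1)
--     # pass 2: slice the segments out and strip them
--     parts = [inner[a:b - 1].strip() for a, b in zip(cuts, cuts[1:])]
--     if parts[-1] == "":
--         parts = parts[:-1]
--     return parts
-- ===== Notes on version B (the rewrite author's own statement) =====
-- stated objective: alternative
-- what changed: A accumulates the current segment's characters and emits stripped parts inside one loop; B first collects the top-level cut positions in a depth-tracking index pass, then builds the parts in a second pass by slicing inner between consecutive cuts, stripping each slice, and finally dropping a trailing empty part.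
import Mathlib
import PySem

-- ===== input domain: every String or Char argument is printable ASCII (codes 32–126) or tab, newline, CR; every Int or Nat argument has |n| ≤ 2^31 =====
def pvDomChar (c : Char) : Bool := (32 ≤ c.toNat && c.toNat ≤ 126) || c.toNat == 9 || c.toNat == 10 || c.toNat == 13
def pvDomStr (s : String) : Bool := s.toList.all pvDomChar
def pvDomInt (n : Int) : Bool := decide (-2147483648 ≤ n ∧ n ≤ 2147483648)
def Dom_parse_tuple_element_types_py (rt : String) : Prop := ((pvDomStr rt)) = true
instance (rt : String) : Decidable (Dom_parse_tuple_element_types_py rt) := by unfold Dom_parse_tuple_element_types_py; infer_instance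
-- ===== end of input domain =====

-- B replaces A's in-loop segment accumulation by a cut-position index pass followed by a slicing pass (alternative decomposition, same cost).

-- ===== PORT A =====
-- literal port of A: one fold over inner carrying (parts, depth, cur); 'tail != ""' is 'strip cur ≠ []' on the char list
def parse_tuple_element_types_py (rt : String) : List String :=
  if !(PySem.Str.startswith rt "tuple[") || !(PySem.Str.endswith rt "]") then []
  else
    let inner := PySem.List.slice rt.toList (some 6) (some (-1))
    let st := inner.foldl (fun (st : List String × Int × List Char) ch =>
        if ch = '[' then (st.1, st.2.1 + 1, st.2.2 ++ [ch])
        else if ch = ']' then (st.1, st.2.1 - 1, st.2.2 ++ [ch])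
        else if ch = ',' ∧ st.2.1 = 0 then
          (st.1 ++ [String.ofList (PySem.Chars.strip st.2.2)], st.2.1, ([] : List Char))
        else (st.1, st.2.1, st.2.2 ++ [ch])) (([] : List String), (0 : Int), ([] : List Char))
    let tail := PySem.Chars.strip st.2.2
    if tail ≠ [] then st.1 ++ [String.ofList tail] else st.1

-- ===== PORT B =====
-- literal port of B: pass 1 collects cut positions (fold over enumerate), pass 2 slices between consecutive cuts
def parse_tuple_element_types_py_alt (rt : String) : List String :=
  if PySem.Str.startswith rt "tuple[" && PySem.Str.endswith rt "]" then
    let inner := PySem.List.slice rt.toList (some 6) (some (-1))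
    let dc := (PySem.List.enumerate inner).foldl (fun (st : Int × List Int) p =>
        if p.2 = '[' then (st.1 + 1, st.2)
        else if p.2 = ']' then (st.1 - 1, st.2)
        else if p.2 = ',' ∧ st.1 = 0 then (st.1, st.2 ++ [p.1 + 1])
        else st) ((0 : Int), ([0] : List Int))
    let cuts := dc.2 ++ [(inner.length : Int) + 1]
    let parts := (cuts.zip (PySem.List.slice cuts (some 1) none)).map (fun ab =>
        String.ofList (PySem.Chars.strip (PySem.List.slice inner (some ab.1) (some (ab.2 - 1)))))
    if PySem.List.pyGet? parts (-1) = some "" then PySem.List.slice parts none (some (-1)) else parts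
  else []

-- ===== PRECONDITION & SPEC =====
def Spec_parse_tuple_element_types_py (rt : String) (out : List String) : Prop := out = parse_tuple_element_types_py_alt rt
instance (rt : String) (out : List String) : Decidable (Spec_parse_tuple_element_types_py rt out) := by unfold Spec_parse_tuple_element_types_py; infer_instance

-- ===== CLAIM (what is proved, stated in full; the proofs are below) =====
def Claim_equal_parse_tuple_element_types_py : Prop := ∀ (rt : String), Dom_parse_tuple_element_types_py rt → Spec_parse_tuple_element_types_py rt (parse_tuple_element_types_py rt)

-- ===== LEMMAS AND PROOFS =====

-- reference splitter: the list of top-level segments of cs, starting at depth d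
def pvSeg (d : Int) : List Char → List (List Char)
  | [] => [[]]
  | c :: cs =>
    if c = ',' ∧ d = 0 then [] :: pvSeg 0 cs
    else
      match pvSeg (if c = '[' then d + 1 else if c = ']' then d - 1 else d) cs with
      | [] => [[c]]
      | s :: ss => (c :: s) :: ss

-- prepend cur to the first segment
def pvConsHead (cur : List Char) : List (List Char) → List (List Char)
  | [] => [cur]
  | s :: ss => (cur ++ s) :: ss

-- drop the last element iff it is ""
def pvDropEmptyLast : List String → List String
  | [] => []
  | [x] => if x = "" then [] else [x]
  | x :: y :: ys => x :: pvDropEmptyLast (y :: ys)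

def pvStrip' (s : List Char) : String := String.ofList (PySem.Chars.strip s)

lemma pvSeg_ne_nil (d : Int) (cs : List Char) : pvSeg d cs ≠ [] := by
  cases cs with
  | nil => simp [pvSeg]
  | cons c cs =>
    unfold pvSeg
    split
    · simp
    · split <;> simp_all

lemma pvSeg_comma (cs : List Char) : pvSeg 0 (',' :: cs) = [] :: pvSeg 0 cs := by
  conv_lhs => rw [pvSeg]
  simp

lemma pvSeg_other {c : Char} {d : Int} (cs : List Char) (h3 : ¬(c = ',' ∧ d = 0)) :
    pvSeg d (c :: cs) =
      pvConsHead [c] (pvSeg (if c = '[' then d + 1 else if c = ']' then d - 1 else d) cs) := by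
  conv_lhs => rw [pvSeg]
  rw [if_neg h3]
  rcases hs : pvSeg (if c = '[' then d + 1 else if c = ']' then d - 1 else d) cs with _ | ⟨s, ss⟩
  · exact absurd hs (pvSeg_ne_nil _ _)
  · simp [pvConsHead]

lemma pvConsHead_consHead (cur : List Char) (c : Char) (l : List (List Char)) :
    pvConsHead cur (pvConsHead [c] l) = pvConsHead (cur ++ [c]) l := by
  cases l <;> simp [pvConsHead]

lemma pvDropEmptyLast_cons {l : List String} (h : l ≠ []) (x : String) :
    pvDropEmptyLast (x :: l) = x :: pvDropEmptyLast l := by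
  cases l with
  | nil => exact absurd rfl h
  | cons y ys => rfl

-- ===== A side =====

lemma pvA_loop (cs : List Char) : ∀ (parts : List String) (d : Int) (cur : List Char),
    (let st := cs.foldl (fun (st : List String × Int × List Char) ch =>
        if ch = '[' then (st.1, st.2.1 + 1, st.2.2 ++ [ch])
        else if ch = ']' then (st.1, st.2.1 - 1, st.2.2 ++ [ch])
        else if ch = ',' ∧ st.2.1 = 0 then
          (st.1 ++ [String.ofList (PySem.Chars.strip st.2.2)], st.2.1, ([] : List Char))
        else (st.1, st.2.1, st.2.2 ++ [ch])) (parts, d, cur);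
      if PySem.Chars.strip st.2.2 ≠ [] then st.1 ++ [String.ofList (PySem.Chars.strip st.2.2)] else st.1)
    = parts ++ pvDropEmptyLast ((pvConsHead cur (pvSeg d cs)).map pvStrip') := by
  induction cs with
  | nil =>
    intro parts d cur
    by_cases h : PySem.Chars.strip cur = []
    · simp [pvSeg, pvConsHead, pvDropEmptyLast, pvStrip', h]
    · simp [pvSeg, pvConsHead, pvDropEmptyLast, pvStrip', h]
  | cons c cs ih =>
    intro parts d cur
    simp only [] at ih
    by_cases h3 : c = ',' ∧ d = 0
    · obtain ⟨hc, hd⟩ := h3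
      subst hc; subst hd
      have h1 : ¬(',' : Char) = '[' := by decide
      have h2 : ¬(',' : Char) = ']' := by decide
      simp only [List.foldl_cons, if_neg h1, if_neg h2, and_self, reduceIte]
      rw [ih, pvSeg_comma]
      rcases hs : pvSeg 0 cs with _ | ⟨s, ss⟩
      · exact absurd hs (pvSeg_ne_nil _ _)
      · simp [pvConsHead, pvStrip', pvDropEmptyLast]
    · by_cases h1 : c = '['
      · subst h1
        simp only [List.foldl_cons, reduceIte]
        rw [ih, pvSeg_other cs h3, pvConsHead_consHead]
        simp only [reduceIte]
      · by_cases h2 : c = ']'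
        · subst h2
          simp only [List.foldl_cons, reduceIte]
          rw [ih, pvSeg_other cs h3, pvConsHead_consHead]
          simp only [reduceIte, if_neg h1]
        · simp only [List.foldl_cons, if_neg h1, if_neg h2, if_neg h3]
          rw [ih, pvSeg_other cs h3, pvConsHead_consHead]
          simp only [if_neg h1, if_neg h2]

-- ===== B side =====

-- positions just after each top-level comma (pass 1 of B, in recursion form)
def pvCutsRec (d : Int) (n : Int) : List Char → List Int
  | [] => []
  | c :: cs =>
    if c = ',' ∧ d = 0 then (n + 1) :: pvCutsRec 0 (n + 1) cs
    else pvCutsRec (if c = '[' then d + 1 else if c = ']' then d - 1 else d) (n + 1) cs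

-- the full cut list determined by the segments (prefix sums of segment lengths + 1)
def pvSumCuts : Nat → List (List Char) → List Int
  | n, [] => [(n : Int)]
  | n, s :: ss => (n : Int) :: pvSumCuts (n + s.length + 1) ss

lemma pvCutsRec_comma (n : Int) (cs : List Char) :
    pvCutsRec 0 n (',' :: cs) = (n + 1) :: pvCutsRec 0 (n + 1) cs := by
  conv_lhs => rw [pvCutsRec]
  simp

lemma pvCutsRec_other {c : Char} {d : Int} (n : Int) (cs : List Char) (h3 : ¬(c = ',' ∧ d = 0)) :
    pvCutsRec d n (c :: cs) =
      pvCutsRec (if c = '[' then d + 1 else if c = ']' then d - 1 else d) (n + 1) cs := by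
  conv_lhs => rw [pvCutsRec]
  rw [if_neg h3]

lemma pvB_fold (cs : List Char) : ∀ (d n : Int) (acc : List Int),
    ((PySem.List.enumerate cs n).foldl (fun (st : Int × List Int) p =>
        if p.2 = '[' then (st.1 + 1, st.2)
        else if p.2 = ']' then (st.1 - 1, st.2)
        else if p.2 = ',' ∧ st.1 = 0 then (st.1, st.2 ++ [p.1 + 1])
        else st) (d, acc)).2 = acc ++ pvCutsRec d n cs := by
  induction cs with
  | nil => intro d n acc; simp [PySem.List.enumerate_nil, pvCutsRec]
  | cons c cs ih =>
    intro d n acc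
    rw [PySem.List.enumerate_cons, List.foldl_cons]
    by_cases h3 : c = ',' ∧ d = 0
    · obtain ⟨hc, hd⟩ := h3; subst hc; subst hd
      rw [pvCutsRec_comma]
      have h1 : ¬(',' : Char) = '[' := by decide
      have h2 : ¬(',' : Char) = ']' := by decide
      simp only [if_neg h1, if_neg h2, and_self, reduceIte]
      rw [ih]
      simp
    · rw [pvCutsRec_other n cs h3]
      by_cases h1 : c = '['
      · subst h1
        simp only [reduceIte]
        rw [ih]
      · by_cases h2 : c = ']'
        · subst h2
          simp only [reduceIte, if_neg h1]
          rw [ih]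
        · simp only [if_neg h1, if_neg h2, if_neg h3]
          rw [ih]

lemma pvCuts_eq (cs : List Char) : ∀ (d : Int) (n : Nat),
    (((n : Int) :: pvCutsRec d n cs) ++ [(n : Int) + cs.length + 1]) = pvSumCuts n (pvSeg d cs) := by
  induction cs with
  | nil =>
    intro d n
    simp [pvCutsRec, pvSeg, pvSumCuts]
  | cons c cs ih =>
    intro d n
    by_cases h3 : c = ',' ∧ d = 0
    · obtain ⟨hc, hd⟩ := h3; subst hc; subst hd
      rw [pvSeg_comma, pvCutsRec_comma]
      have hih := ih 0 (n + 1)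
      push_cast at hih
      rw [show pvSumCuts n ([] :: pvSeg 0 cs) = (n : Int) :: pvSumCuts (n + 1) (pvSeg 0 cs) from by
        simp [pvSumCuts]]
      rw [← hih]
      simp only [List.cons_append, List.length_cons, List.cons.injEq, true_and]
      rw [List.append_right_inj]
      simp only [List.cons.injEq, and_true]
      push_cast
      ring
    · rcases hs : pvSeg (if c = '[' then d + 1 else if c = ']' then d - 1 else d) cs with _ | ⟨s, ss⟩
      · exact absurd hs (pvSeg_ne_nil _ _)
      · rw [pvSeg_other cs h3, pvCutsRec_other (n : Int) cs h3, hs]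
        have hih := ih (if c = '[' then d + 1 else if c = ']' then d - 1 else d) (n + 1)
        rw [hs] at hih
        simp only [pvSumCuts] at hih
        push_cast at hih
        simp only [List.cons_append, List.cons.injEq, true_and] at hih
        have hcon : pvSumCuts n (pvConsHead [c] (s :: ss)) =
            (n : Int) :: pvSumCuts (n + 1 + s.length + 1) ss := by
          simp only [pvConsHead, List.singleton_append, pvSumCuts, List.length_cons]
          rw [show n + (s.length + 1) + 1 = n + 1 + s.length + 1 from by omega]
        rw [hcon, ← hih]
        simp only [List.cons_append, List.length_cons, List.cons.injEq, true_and]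
        rw [List.append_right_inj]
        simp only [List.cons.injEq, and_true]
        push_cast
        ring

-- join the segments back with top-level commas
def pvJoinC : List (List Char) → List Char
  | [] => []
  | [s] => s
  | s :: ss => s ++ ',' :: pvJoinC ss

lemma pvJoinC_cons_head (c : Char) (s : List Char) (ss : List (List Char)) :
    pvJoinC ((c :: s) :: ss) = c :: pvJoinC (s :: ss) := by
  cases ss <;> rfl

lemma pvJoin_seg (cs : List Char) : ∀ d, pvJoinC (pvSeg d cs) = cs := by
  induction cs with
  | nil => intro d; rfl
  | cons c cs ih =>
    intro d
    by_cases h3 : c = ',' ∧ d = 0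
    · obtain ⟨hc, hd⟩ := h3; subst hc; subst hd
      rw [pvSeg_comma]
      rcases hs : pvSeg 0 cs with _ | ⟨s, ss⟩
      · exact absurd hs (pvSeg_ne_nil _ _)
      · have hih := ih 0
        rw [hs] at hih
        simp [pvJoinC, hih]
    · rcases hs : pvSeg (if c = '[' then d + 1 else if c = ']' then d - 1 else d) cs with _ | ⟨s, ss⟩
      · exact absurd hs (pvSeg_ne_nil _ _)
      · rw [pvSeg_other cs h3, hs]
        simp only [pvConsHead, List.singleton_append]
        rw [pvJoinC_cons_head]
        have hih := ih (if c = '[' then d + 1 else if c = ']' then d - 1 else d)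
        rw [hs] at hih
        rw [hih]

lemma pvZip_slices (f : List Char → String) : ∀ (ss : List (List Char)) (cs : List Char) (n : Nat),
    cs.drop n = pvJoinC ss → ss ≠ [] →
    ((pvSumCuts n ss).zip (pvSumCuts n ss).tail).map
      (fun ab => f (PySem.List.slice cs (some ab.1) (some (ab.2 - 1)))) = ss.map f := by
  intro ss
  induction ss with
  | nil => intro cs n _ h; exact absurd rfl h
  | cons s ss ih =>
    intro cs n hdrop _
    cases ss with
    | nil =>
      simp only [pvSumCuts, List.tail_cons, List.zip_cons_cons, List.zip_nil_right,
        List.map_cons, List.map_nil, List.cons.injEq, and_true]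
      have h1 : (((n + s.length + 1 : Nat) : Int)) - 1 = ((n + s.length : Nat) : Int) := by
        push_cast; ring
      rw [h1, PySem.List.slice_natCast]
      congr 1
      have hd : cs.drop n = s := hdrop
      rw [show n + s.length - n = s.length by omega, hd]
      simp
    | cons t ts =>
      have hjoin : pvJoinC (s :: t :: ts) = s ++ ',' :: pvJoinC (t :: ts) := rfl
      have hdrop2 : cs.drop (n + s.length + 1) = pvJoinC (t :: ts) := by
        have h' : cs.drop (n + s.length + 1) = (cs.drop n).drop (s.length + 1) := by
          rw [List.drop_drop]
          congr 1
        rw [h', hdrop, hjoin, show s.length + 1 = (s ++ [',']).length by simp,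
          show s ++ ',' :: pvJoinC (t :: ts) = (s ++ [',']) ++ pvJoinC (t :: ts) by simp,
          List.drop_left]
      have hrest := ih cs (n + s.length + 1) hdrop2 (by simp)
      rw [pvSumCuts]
      have hsum2 : pvSumCuts (n + s.length + 1) (t :: ts) =
          ((n + s.length + 1 : Nat) : Int) :: (pvSumCuts (n + s.length + 1) (t :: ts)).tail := by
        simp [pvSumCuts]
      rw [hsum2]
      simp only [List.tail_cons, List.zip_cons_cons, List.map_cons, List.cons.injEq]
      constructor
      · have h1 : ((n + s.length + 1 : Nat) : Int) - 1 = ((n + s.length : Nat) : Int) := by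
          push_cast; ring
        rw [h1, PySem.List.slice_natCast]
        congr 1
        rw [hdrop, hjoin]
        rw [show n + s.length - n = s.length by omega]
        exact List.take_left' rfl
      · rw [← hsum2, hrest, List.map_cons]

lemma pvPyGet_neg_one_dropEmptyLast (l : List String) :
    (if PySem.List.pyGet? l (-1) = some "" then PySem.List.slice l none (some (-1)) else l)
      = pvDropEmptyLast l := by
  induction l with
  | nil => simp [PySem.List.pyGet?, PySem.List.pyIdx?, pvDropEmptyLast]
  | cons x xs ih =>
    cases xs with
    | nil =>
      by_cases h : x = ""
      · subst h
        simp [PySem.List.pyGet?, PySem.List.pyIdx?, pvDropEmptyLast,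
          PySem.List.slice_to_neg_one]
      · simp [PySem.List.pyGet?, PySem.List.pyIdx?, pvDropEmptyLast, h]
    | cons y ys =>
      rw [pvDropEmptyLast_cons (by simp), ← ih]
      have hg : PySem.List.pyGet? (x :: y :: ys) (-1) = PySem.List.pyGet? (y :: ys) (-1) := by
        simp [PySem.List.pyGet?, PySem.List.pyIdx?]
        rfl
      rw [hg]
      by_cases h : PySem.List.pyGet? (y :: ys) (-1) = some ""
      · simp only [h]
        rw [PySem.List.slice_to_neg_one, PySem.List.slice_to_neg_one]
        simp
      · simp [h]

-- ===== main assembly =====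

lemma pv_main (rt : String) : parse_tuple_element_types_py rt = parse_tuple_element_types_py_alt rt := by
  unfold parse_tuple_element_types_py parse_tuple_element_types_py_alt
  rw [show (!(PySem.Str.startswith rt "tuple[") || !(PySem.Str.endswith rt "]"))
        = !(PySem.Str.startswith rt "tuple[" && PySem.Str.endswith rt "]") from by
    cases PySem.Str.startswith rt "tuple[" <;> cases PySem.Str.endswith rt "]" <;> rfl]
  cases hg : (PySem.Str.startswith rt "tuple[" && PySem.Str.endswith rt "]") with
  | false => simp
  | true =>
  simp only [Bool.not_true]
  rw [if_neg (by decide : ¬(false = true))]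
  set inner := PySem.List.slice rt.toList (some 6) (some (-1)) with hinner
  have hA := pvA_loop inner [] 0 []
  simp only [] at hA
  rw [hA]
  have hfold := pvB_fold inner 0 0 [0]
  rw [hfold]
  have hcuts : (([(0 : Int)] ++ pvCutsRec 0 0 inner) ++ [(inner.length : Int) + 1])
      = pvSumCuts 0 (pvSeg 0 inner) := by
    have h0 := pvCuts_eq inner 0 0
    simpa using h0
  rw [hcuts]
  rw [PySem.List.slice_from_one]
  have hzip := pvZip_slices (fun l => String.ofList (PySem.Chars.strip l)) (pvSeg 0 inner) inner 0
    (by simpa using (pvJoin_seg inner 0).symm) (pvSeg_ne_nil _ _)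
  simp only [] at hzip
  rw [hzip]
  rw [pvPyGet_neg_one_dropEmptyLast]
  rcases hs : pvSeg 0 inner with _ | ⟨s, ss⟩
  · exact absurd hs (pvSeg_ne_nil _ _)
  · simp [pvConsHead, pvStrip']
    rfl

-- ===== VERDICT (by name: the statement is the Claim_ definition above) =====
theorem parse_tuple_element_types_py_spec : Claim_equal_parse_tuple_element_types_py := by
  intro rt _
  unfold Spec_parse_tuple_element_types_py
  exact pv_main rt
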